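-- pv_equiv track=rewrite | github.com/TalsoR92/flowFreeSolver | screen_examples/make_tuple.py | make_tuple
-- ===== SOURCE A (Python) =====
-- def make_tuple(paths, len_tuple):
--     if len_tuple == 0 or paths == []:
--         return []
--     tot_tuple = []
--     len_paths = len(paths)
--     for elt in paths[0]:
--         list_tuple = []
--         recursive_tuple(paths[1:], len_paths - 1, len_tuple - 1, list_tuple, [elt])
--         if list_tuple != []:
--             tot_tuple += list_tuple
--
--     return tot_tuple
--
-- def recursive_tuple(m, len_m, size_tuple, list_tuple, actual_tuple):
--     if any(elt in m[0] for elt in actual_tuple):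
--         if len_m == 1:
--             list_tuple.append(actual_tuple.copy())
--         else:
--             recursive_tuple(m[1:], len_m - 1, size_tuple, list_tuple, actual_tuple)
--     elif size_tuple > 0:
--         if len_m == 1:
--             for elt in m[0]:
--                 actual_tuple.append(elt)
--                 list_tuple.append(actual_tuple.copy())
--                 actual_tuple.pop()
--         else:
--             for elt in m[0]:
--                 actual_tuple.append(elt)
--                 recursive_tuple(m[1:], len_m - 1, size_tuple - 1, list_tuple, actual_tuple)
--                 actual_tuple.pop()
-- ===== SOURCE B (Python) =====
-- def make_tuple(paths, len_tuple):
--     # Iterative level-by-level expansion: one pass over the tail lists,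
--     # maintaining the list of live partial states (tuple, remaining budget).
--     if len_tuple == 0 or not paths:
--         return []
--     states = [([e], len_tuple - 1) for e in paths[0]]
--     for lst in paths[1:]:
--         nxt = []
--         for cur, budget in states:
--             if any(e in lst for e in cur):
--                 nxt.append((cur, budget))
--             elif budget > 0:
--                 for e in lst:
--                     nxt.append((cur + [e], budget - 1))
--         states = nxt
--     return [cur for cur, _ in states]
-- ===== Notes on version B (the rewrite author's own statement) =====
-- stated objective: alternative
-- what changed: Replaces the mutual recursion with list-index bookkeeping and in-place accumulator mutation by a single iterative level-by-level (breadth-first) pass over the tail lists that maintains the list of live partial states (tuple, remaining budget); left-to-right expansion at each level yields A's exact output order.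
-- outside the precondition, e.g. on make_tuple([[1, 2]], 2): A raises IndexError, B returns [[1], [2]]
import Mathlib
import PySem

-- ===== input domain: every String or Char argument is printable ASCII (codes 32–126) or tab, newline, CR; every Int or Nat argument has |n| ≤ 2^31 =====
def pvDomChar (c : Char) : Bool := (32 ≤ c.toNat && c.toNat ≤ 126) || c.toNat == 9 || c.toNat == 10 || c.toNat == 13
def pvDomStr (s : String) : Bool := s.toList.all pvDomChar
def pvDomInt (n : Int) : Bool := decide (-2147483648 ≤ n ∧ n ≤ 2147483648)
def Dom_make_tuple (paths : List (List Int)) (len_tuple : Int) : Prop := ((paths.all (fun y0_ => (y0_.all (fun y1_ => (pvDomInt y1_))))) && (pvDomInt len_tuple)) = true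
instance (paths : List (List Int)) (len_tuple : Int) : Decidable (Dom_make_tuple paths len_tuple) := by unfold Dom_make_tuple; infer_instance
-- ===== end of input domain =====

-- B replaces A's mutual recursion (with in-place accumulator mutation) by a single
-- iterative level-by-level pass maintaining the list of live partial states (alternative
-- decomposition; equivalence is about the return value, A mutates only its own locals).

-- ===== PORT A =====
-- rtLoop is the 'for elt in m[0]' loop of recursive_tuple's last branch.
mutual
def recursive_tuple : List (List Int) → Int → Int → List (List Int) → List Int → List (List Int)
  | [], _, _, list_tuple, _ => list_tuple  -- Python raises IndexError here; excluded by Pre_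
  | m0 :: mrest, len_m, size_tuple, list_tuple, actual_tuple =>
    if actual_tuple.any (fun e => m0.contains e) then
      if len_m = 1 then list_tuple ++ [actual_tuple]
      else recursive_tuple mrest (len_m - 1) size_tuple list_tuple actual_tuple
    else if size_tuple > 0 then
      if len_m = 1 then
        m0.foldl (fun lt e => lt ++ [actual_tuple ++ [e]]) list_tuple
      else
        rtLoop mrest (len_m - 1) (size_tuple - 1) actual_tuple m0 list_tuple
    else list_tuple
  termination_by m _ _ _ _ => (m.length, 0)

def rtLoop : List (List Int) → Int → Int → List Int → List Int → List (List Int) → List (List Int)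
  | _, _, _, _, [], lt => lt
  | mrest, len_m, size_tuple, actual_tuple, e :: es, lt =>
    rtLoop mrest len_m size_tuple actual_tuple es
      (recursive_tuple mrest len_m size_tuple lt (actual_tuple ++ [e]))
  termination_by m _ _ _ es _ => (m.length, es.length + 1)
end

def make_tuple (paths : List (List Int)) (len_tuple : Int) : List (List Int) :=
  if len_tuple = 0 ∨ paths = [] then []
  else
    match paths with
    | [] => []
    | p0 :: rest =>
      p0.foldl (fun tot elt =>
        let list_tuple :=
          recursive_tuple rest (((p0 :: rest).length : Int) - 1) (len_tuple - 1) [] [elt]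
        if list_tuple ≠ [] then tot ++ list_tuple else tot) []

-- ===== PORT B =====
def make_tuple_alt (paths : List (List Int)) (len_tuple : Int) : List (List Int) :=
  if len_tuple = 0 ∨ paths = [] then []
  else
    match paths with
    | [] => []
    | p0 :: rest =>
      let init : List (List Int × Int) := p0.map (fun e => ([e], len_tuple - 1))
      let states := rest.foldl (fun states lst =>
        states.foldl (fun nxt cb =>
          if cb.1.any (fun e => lst.contains e) then nxt ++ [cb]
          else if cb.2 > 0 then lst.foldl (fun nxt2 e => nxt2 ++ [(cb.1 ++ [e], cb.2 - 1)]) nxt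
          else nxt) []) init
      states.map (fun cb => cb.1)

-- ===== PRECONDITION & SPEC =====
-- Pre_ excludes exactly the inputs on which A raises IndexError: a single nonempty
-- list with len_tuple ≠ 0 (recursive_tuple then indexes m[0] on the empty tail).
def Pre_make_tuple (paths : List (List Int)) (len_tuple : Int) : Prop :=
  len_tuple = 0 ∨ paths.length ≠ 1 ∨ paths.head? = some []
instance (paths : List (List Int)) (len_tuple : Int) : Decidable (Pre_make_tuple paths len_tuple) := by unfold Pre_make_tuple; infer_instance
def pvWitness_make_tuple : List (List Int) × Int := ([[1], [1, 2]], 2)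

def Spec_make_tuple (paths : List (List Int)) (len_tuple : Int) (out : List (List Int)) : Prop := out = make_tuple_alt paths len_tuple
instance (paths : List (List Int)) (len_tuple : Int) (out : List (List Int)) : Decidable (Spec_make_tuple paths len_tuple out) := by unfold Spec_make_tuple; infer_instance

-- ===== CLAIM (what is proved, stated in full; the proofs are below) =====
def Claim_equal_make_tuple : Prop := ∀ (paths : List (List Int)) (len_tuple : Int), Dom_make_tuple paths len_tuple → Pre_make_tuple paths len_tuple → Spec_make_tuple paths len_tuple (make_tuple paths len_tuple)

-- ===== LEMMAS AND PROOFS =====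

-- B's expansion of one state by one list, and one whole level.
def pvExpand (lst : List Int) (cb : List Int × Int) : List (List Int × Int) :=
  if cb.1.any (fun e => lst.contains e) then [cb]
  else if cb.2 > 0 then lst.map (fun e => (cb.1 ++ [e], cb.2 - 1)) else []

def pvStep (states : List (List Int × Int)) (lst : List Int) : List (List Int × Int) :=
  states.flatMap (pvExpand lst)

theorem step_eq (lst : List Int) (states : List (List Int × Int)) :
    states.foldl (fun nxt cb =>
      if cb.1.any (fun e => lst.contains e) then nxt ++ [cb]
      else if cb.2 > 0 then lst.foldl (fun nxt2 e => nxt2 ++ [(cb.1 ++ [e], cb.2 - 1)]) nxt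
      else nxt) [] = pvStep states lst := by
  have h : (fun (nxt : List (List Int × Int)) cb =>
      if cb.1.any (fun e => lst.contains e) then nxt ++ [cb]
      else if cb.2 > 0 then lst.foldl (fun nxt2 e => nxt2 ++ [(cb.1 ++ [e], cb.2 - 1)]) nxt
      else nxt) = (fun nxt cb => nxt ++ pvExpand lst cb) := by
    funext nxt cb
    unfold pvExpand
    split_ifs with h1 h2
    · rfl
    · rw [PySem.List.foldl_append_singleton_eq_map]
    · simp
  rw [h, PySem.List.foldl_append_eq_flatMap]
  simp [pvStep]

theorem levels_nil : ∀ (rest : List (List Int)), List.foldl pvStep [] rest = []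
  | [] => rfl
  | lst :: rest => by simp [List.foldl_cons, pvStep, levels_nil rest]

theorem levels_append (rest : List (List Int)) :
    ∀ (s1 s2 : List (List Int × Int)),
      List.foldl pvStep (s1 ++ s2) rest = List.foldl pvStep s1 rest ++ List.foldl pvStep s2 rest := by
  induction rest with
  | nil => intro s1 s2; simp
  | cons lst rest ih =>
    intro s1 s2
    simp only [List.foldl_cons]
    rw [show pvStep (s1 ++ s2) lst = pvStep s1 lst ++ pvStep s2 lst by simp [pvStep]]
    exact ih _ _

theorem levels_flatMap (rest : List (List Int)) :
    ∀ (ss : List (List Int × Int)),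
      List.foldl pvStep ss rest = ss.flatMap (fun cb => List.foldl pvStep [cb] rest) := by
  intro ss
  induction ss with
  | nil => simp [levels_nil]
  | cons cb ss ih =>
    have h : cb :: ss = [cb] ++ ss := rfl
    rw [h, levels_append, ih]
    simp

-- accumulator lemmas for A's recursion
theorem rtLoop_acc (mrest : List (List Int))
    (IH : ∀ l s acc cur, recursive_tuple mrest l s acc cur = acc ++ recursive_tuple mrest l s [] cur) :
    ∀ (es : List Int) (l s : Int) (cur : List Int) (acc : List (List Int)),
      rtLoop mrest l s cur es acc = acc ++ rtLoop mrest l s cur es [] := by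
  intro es
  induction es with
  | nil => intro l s cur acc; simp [rtLoop]
  | cons e es ih =>
    intro l s cur acc
    simp only [rtLoop]
    rw [IH]
    rw [ih l s cur (acc ++ recursive_tuple mrest l s [] (cur ++ [e])),
        ih l s cur (recursive_tuple mrest l s [] (cur ++ [e]))]
    simp

theorem rt_acc : ∀ (m : List (List Int)) (l s : Int) (acc : List (List Int)) (cur : List Int),
    recursive_tuple m l s acc cur = acc ++ recursive_tuple m l s [] cur := by
  intro m
  induction m with
  | nil => intro l s acc cur; simp [recursive_tuple]
  | cons m0 mrest ih =>
    intro l s acc cur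
    simp only [recursive_tuple]
    split_ifs with h1 h2 h3 h4
    · simp
    · exact ih _ _ _ _
    · rw [PySem.List.foldl_append_singleton_eq_map, PySem.List.foldl_append_singleton_eq_map]
      simp
    · rw [rtLoop_acc mrest ih]
    · simp

theorem rtLoop_flatMap (mrest : List (List Int)) (l s : Int) (cur : List Int) :
    ∀ (es : List Int),
      rtLoop mrest l s cur es [] = es.flatMap (fun e => recursive_tuple mrest l s [] (cur ++ [e])) := by
  intro es
  induction es with
  | nil => simp [rtLoop]
  | cons e es ih =>
    simp only [rtLoop]
    rw [rtLoop_acc mrest (fun l s acc cur => rt_acc mrest l s acc cur)]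
    simp [ih]

theorem rt_levels : ∀ (rest : List (List Int)), rest ≠ [] → ∀ (cur : List Int) (b : Int),
    (List.foldl pvStep [(cur, b)] rest).map (fun cb => cb.1)
      = recursive_tuple rest (rest.length : Int) b [] cur := by
  intro rest
  induction rest with
  | nil => intro h; exact absurd rfl h
  | cons lst rest ih =>
    intro _ cur b
    have hstep : List.foldl pvStep [(cur, b)] (lst :: rest)
        = List.foldl pvStep (pvExpand lst (cur, b)) rest := by
      simp [List.foldl_cons, pvStep]
    rw [hstep]
    rcases eq_or_ne rest [] with hr | hr
    · subst hr
      simp only [List.foldl_nil, recursive_tuple, pvExpand, List.length_singleton, Nat.cast_one]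
      split_ifs with h1 h2
      · simp
      · rw [PySem.List.foldl_append_singleton_eq_map]
        simp [List.map_map]
      · simp
    · have hpos : 0 < rest.length := List.length_pos_iff.mpr hr
      have hne1 : ¬ ((lst :: rest).length : Int) = 1 := by
        simp only [List.length_cons]; push_cast; omega
      have hsub : ((lst :: rest).length : Int) - 1 = (rest.length : Int) := by
        simp only [List.length_cons]; push_cast; ring
      unfold pvExpand
      simp only [recursive_tuple]
      by_cases h1 : (cur.any fun e => lst.contains e) = true
      · simp only [if_pos h1, if_neg hne1, hsub]
        exact ih hr cur b
      · by_cases h2 : b > 0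
        · simp only [if_neg h1, if_pos h2, if_neg hne1, hsub]
          rw [levels_flatMap, rtLoop_flatMap]
          simp only [List.flatMap_map, List.map_flatMap]
          simp only [ih hr]
        · simp only [if_neg h1, if_neg h2]
          rw [levels_nil]
          simp

-- ===== VERDICT (by name: the statement is the Claim_ definition above) =====
theorem make_tuple_spec : Claim_equal_make_tuple := by
  intro paths len_tuple _ hpre
  unfold Spec_make_tuple make_tuple make_tuple_alt
  by_cases h0 : len_tuple = 0 ∨ paths = []
  · rw [if_pos h0, if_pos h0]
  · rw [if_neg h0, if_neg h0]
    obtain ⟨hlt, hpnil⟩ := not_or.mp h0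
    cases paths with
    | nil => exact absurd rfl hpnil
    | cons p0 rest =>
      rcases eq_or_ne rest [] with hr | hr
      · subst hr
        have hp0 : p0 = [] := by
          rcases hpre with h | h | h
          · exact absurd h hlt
          · simp at h
          · simpa using h
        subst hp0
        simp
      · have hfun : (fun (states : List (List Int × Int)) (lst : List Int) =>
            states.foldl (fun nxt cb =>
              if cb.1.any (fun e => lst.contains e) then nxt ++ [cb]
              else if cb.2 > 0 then lst.foldl (fun nxt2 e => nxt2 ++ [(cb.1 ++ [e], cb.2 - 1)]) nxt
              else nxt) []) = pvStep := by
          funext states lst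
          exact step_eq lst states
        rw [hfun]
        have hsub : ((p0 :: rest).length : Int) - 1 = (rest.length : Int) := by
          simp only [List.length_cons]; push_cast; ring
        have hA : (fun (tot : List (List Int)) (elt : Int) =>
            let list_tuple :=
              recursive_tuple rest (((p0 :: rest).length : Int) - 1) (len_tuple - 1) [] [elt]
            if list_tuple ≠ [] then tot ++ list_tuple else tot)
            = fun tot elt => tot ++ recursive_tuple rest ((rest.length : Int)) (len_tuple - 1) [] [elt] := by
          funext tot elt
          simp only [hsub]
          split_ifs with h
          · rfl
          · simp only [ne_eq, not_not] at h
            simp [h]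
        dsimp only
        rw [hA, PySem.List.foldl_append_eq_flatMap, levels_flatMap]
        simp only [List.flatMap_map, List.map_flatMap]
        simp only [rt_levels rest hr]
        simp
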